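-- pv_equiv track=rewrite | github.com/WeOps-Lab/weops_lite | apps/system_mgmt/services/role_manage.py | get_subordinate_roles
-- ===== SOURCE A (Python) =====
-- def get_subordinate_roles(role_name, hierarchy):
--     # 递归函数来获取某个角色的所有下级角色
--     sub_roles = []
--
--     def _get_subordinate_roles(role_name):
--         for sub_role in hierarchy.get(role_name, []):
--             sub_roles.append(sub_role)
--             _get_subordinate_roles(sub_role)
--
--     _get_subordinate_roles(role_name)
--     return sub_roles
-- ===== SOURCE B (Python) =====
-- def get_subordinate_roles(role_name, hierarchy):
--     # iterative DFS over an explicit worklist instead of A's recursive closure: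
--     # pop the front node, record it, prepend its children (preserves pre-order)
--     stack = list(hierarchy.get(role_name, []))
--     result = []
--     while stack:
--         node = stack.pop(0)
--         result.append(node)
--         stack = hierarchy.get(node, []) + stack
--     return result
-- ===== Notes on version B (the rewrite author's own statement) =====
-- stated objective: alternative
-- what changed: A's recursive inner closure appending to a shared list is replaced by an iterative depth-first traversal over an explicit worklist (pop the front node, prepend its children), producing the same pre-order list without recursion.
import Mathlib
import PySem

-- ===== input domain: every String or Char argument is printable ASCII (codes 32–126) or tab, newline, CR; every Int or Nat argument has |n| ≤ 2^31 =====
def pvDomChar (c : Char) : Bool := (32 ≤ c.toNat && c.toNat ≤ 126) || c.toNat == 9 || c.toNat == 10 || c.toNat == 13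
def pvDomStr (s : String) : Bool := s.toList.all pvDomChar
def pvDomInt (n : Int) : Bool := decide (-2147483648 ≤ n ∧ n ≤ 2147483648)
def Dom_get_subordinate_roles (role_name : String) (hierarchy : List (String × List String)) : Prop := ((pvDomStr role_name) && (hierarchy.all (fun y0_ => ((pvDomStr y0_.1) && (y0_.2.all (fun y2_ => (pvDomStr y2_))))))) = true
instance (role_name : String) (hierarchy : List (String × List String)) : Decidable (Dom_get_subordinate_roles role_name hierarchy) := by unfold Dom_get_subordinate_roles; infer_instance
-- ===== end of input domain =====

-- B replaces A's recursive inner closure mutating a shared list by an iterative DFS over an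
-- explicit worklist (pop the front node, prepend its children); same pre-order output.

-- hierarchy.get(x, [])
def pvChs (hierarchy : List (String × List String)) (x : String) : List String :=
  PySem.Dict.getD (PySem.Dict.mk hierarchy) x []

-- all strings occurring as children anywhere in the hierarchy
def pvVals (hierarchy : List (String × List String)) : List String :=
  hierarchy.flatMap Prod.snd

-- a depth bound: a repetition-free chain of children makes fewer than this many steps
def pvN (hierarchy : List (String × List String)) : Nat :=
  (pvVals hierarchy).dedup.length + 1

-- ===== PORT A =====
-- the inner closure _get_subordinate_roles, with sub_roles as an explicit accumulator;
-- the fuel pvN bounds the recursion depth (sufficient under Pre_, proved below)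
def pvARec (hierarchy : List (String × List String)) : Nat → List String → String → List String
  | 0, acc, _ => acc
  | f + 1, acc, role =>
      (pvChs hierarchy role).foldl (fun a c => pvARec hierarchy f (a ++ [c]) c) acc

def get_subordinate_roles (role_name : String) (hierarchy : List (String × List String)) : List String :=
  pvARec hierarchy (pvN hierarchy) [] role_name

-- ===== PORT B =====
-- the while loop of Source B: pop the front of the stack, append it to result, prepend its
-- children; the fuel bounds the number of iterations (sufficient under Pre_, proved below)
def pvBLoop (hierarchy : List (String × List String)) : Nat → List String → List String → List String
  | _, [], res => res
  | 0, _ :: _, res => res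
  | f + 1, node :: rest, res =>
      pvBLoop hierarchy f (pvChs hierarchy node ++ rest) (res ++ [node])

def pvFuel (hierarchy : List (String × List String)) : Nat :=
  ((pvVals hierarchy).length + 1) ^ (pvN hierarchy + 2)

def get_subordinate_roles_alt (role_name : String) (hierarchy : List (String × List String)) : List String :=
  pvBLoop hierarchy (pvFuel hierarchy) (pvChs hierarchy role_name) []

-- ===== PRECONDITION & SPEC =====
-- pvStep/pvReach state plain k-step reachability in the role graph (a condition on the input
-- graph's shape; neither port computes reachable sets)
def pvStep (hierarchy : List (String × List String)) (S : List String) : List String :=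
  S ++ S.flatMap (pvChs hierarchy)

-- everything reachable from S in at most k child-steps
def pvReach (hierarchy : List (String × List String)) : Nat → List String → List String
  | 0, S => S
  | k + 1, S => pvReach hierarchy k (pvStep hierarchy S)

-- Pre_ excludes exactly the inputs on which A never returns: a role reachable from role_name
-- lies on a directed cycle, so A's unbounded recursion raises RecursionError there.
def Pre_get_subordinate_roles (role_name : String) (hierarchy : List (String × List String)) : Prop :=
  ∀ x ∈ pvReach hierarchy (pvN hierarchy) [role_name],
    x ∉ pvReach hierarchy (pvN hierarchy) (pvChs hierarchy x)

instance (role_name : String) (hierarchy : List (String × List String)) : Decidable (Pre_get_subordinate_roles role_name hierarchy) := by unfold Pre_get_subordinate_roles; infer_instance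

def pvWitness_get_subordinate_roles : String × (List (String × List String)) :=
  ("a", [("a", ["b", "c"]), ("b", ["c"])])

def Spec_get_subordinate_roles (role_name : String) (hierarchy : List (String × List String)) (out : List String) : Prop := out = get_subordinate_roles_alt role_name hierarchy
instance (role_name : String) (hierarchy : List (String × List String)) (out : List String) : Decidable (Spec_get_subordinate_roles role_name hierarchy out) := by unfold Spec_get_subordinate_roles; infer_instance

-- ===== CLAIM (what is proved, stated in full; the proofs are below) =====
def Claim_equal_get_subordinate_roles : Prop := ∀ (role_name : String) (hierarchy : List (String × List String)), Dom_get_subordinate_roles role_name hierarchy → Pre_get_subordinate_roles role_name hierarchy → Spec_get_subordinate_roles role_name hierarchy (get_subordinate_roles role_name hierarchy)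

-- ===== LEMMAS AND PROOFS =====

-- the pure pre-order traversal both ports are reduced to
def pvT (hierarchy : List (String × List String)) : Nat → String → List String
  | 0, _ => []
  | f + 1, n => (pvChs hierarchy n).flatMap (fun c => c :: pvT hierarchy f c)

-- vis = the successive nodes of a walk that starts at role (role first, endpoint last)
inductive PvPath (hierarchy : List (String × List String)) (role : String) : List String → String → Prop
  | start : PvPath hierarchy role [role] role
  | step {vis n c} : PvPath hierarchy role vis n → c ∈ pvChs hierarchy n →
      PvPath hierarchy role (vis ++ [c]) c

theorem pv_mem_chs_mem_vals (hierarchy : List (String × List String)) (x c : String)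
    (hc : c ∈ pvChs hierarchy x) : c ∈ pvVals hierarchy := by
  induction hierarchy with
  | nil => simp [pvChs, PySem.Dict.getD, PySem.Dict.get?] at hc
  | cons p t ih =>
    simp only [pvChs, PySem.Dict.getD_eq_get?_getD] at hc ih
    rw [show (PySem.Dict.mk (p :: t)) = PySem.Dict.mk ((p.1, p.2) :: t) by simp] at hc
    rw [PySem.Dict.get?_mk_cons] at hc
    by_cases he : p.1 == x
    · simp [he] at hc
      simp [pvVals]
      exact Or.inl hc
    · simp [he] at hc
      have := ih hc
      simp [pvVals] at this ⊢
      exact Or.inr this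

theorem pv_chs_len_le (hierarchy : List (String × List String)) (x : String) :
    (pvChs hierarchy x).length ≤ (pvVals hierarchy).length := by
  induction hierarchy with
  | nil => simp [pvChs, PySem.Dict.getD, PySem.Dict.get?]
  | cons p t ih =>
    simp only [pvChs, PySem.Dict.getD_eq_get?_getD, pvVals, List.length_flatMap] at ih ⊢
    rw [show (PySem.Dict.mk (p :: t)) = PySem.Dict.mk ((p.1, p.2) :: t) by simp]
    rw [PySem.Dict.get?_mk_cons]
    by_cases he : p.1 == x
    · simp [he]
    · simp [he]
      omega

theorem pv_step_mem (h : List (String × List String)) {S : List String} {x c : String}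
    (hx : x ∈ S) (hc : c ∈ pvChs h x) : c ∈ pvStep h S := by
  simp [pvStep]; exact Or.inr ⟨x, hx, hc⟩

theorem pv_sub_step (h : List (String × List String)) (S : List String) : S ⊆ pvStep h S := by
  intro y hy; simp [pvStep]; exact Or.inl hy

theorem pv_reach_succ' (h : List (String × List String)) (k : Nat) (S : List String) :
    pvReach h (k + 1) S = pvStep h (pvReach h k S) := by
  induction k generalizing S with
  | zero => rfl
  | succ k ih => simpa [pvReach] using ih (pvStep h S)

theorem pv_sub_reach (h : List (String × List String)) (k : Nat) (S : List String) :
    S ⊆ pvReach h k S := by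
  induction k generalizing S with
  | zero => simp [pvReach]
  | succ k ih => exact fun y hy => ih (pvStep h S) (pv_sub_step h S hy)

theorem pv_reach_mono_fuel (h : List (String × List String)) {j k : Nat} (hjk : j ≤ k)
    (S : List String) : pvReach h j S ⊆ pvReach h k S := by
  induction k with
  | zero =>
    have : j = 0 := Nat.le_zero.mp hjk
    subst this; exact fun y hy => hy
  | succ k ih =>
    by_cases hj : j = k + 1
    · subst hj; exact fun y hy => hy
    · have hjk' : j ≤ k := by omega
      intro y hy
      rw [pv_reach_succ']
      exact pv_sub_step h _ (ih hjk' hy)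

theorem pv_path_last (h : List (String × List String)) (role : String) :
    ∀ {vis n}, PvPath h role vis n → vis.getLast? = some n := by
  intro vis n hp
  induction hp with
  | start => rfl
  | step hp hc ih => simp

theorem pv_path_shape (h : List (String × List String)) (role : String) :
    ∀ {vis n}, PvPath h role vis n → ∃ rest, vis = role :: rest ∧ rest ⊆ pvVals h := by
  intro vis n hp
  induction hp with
  | start => exact ⟨[], rfl, by simp⟩
  | step hp hc ih =>
    rename_i vis' n' c'
    rcases ih with ⟨rest, hv, hsub⟩
    refine ⟨rest ++ [c'], by simp [hv], ?_⟩
    intro y hy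
    simp at hy
    rcases hy with hy | hy
    · exact hsub hy
    · subst hy; exact pv_mem_chs_mem_vals h _ _ hc

theorem pv_path_end_reach (h : List (String × List String)) (role : String) :
    ∀ {vis n}, PvPath h role vis n → n ∈ pvReach h (vis.length - 1) [role] := by
  intro vis n hp
  induction hp with
  | start => simp [pvReach]
  | step hp hc ih =>
    rename_i vis' n' c'
    have h1 : vis'.length ≠ 0 := by
      cases hp <;> simp
    have h2 : (vis' ++ [c']).length - 1 = (vis'.length - 1) + 1 := by
      simp; omega
    rw [h2, pv_reach_succ']
    exact pv_step_mem h ih hc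

theorem pv_path_prefix (h : List (String × List String)) (role : String) :
    ∀ {vis n}, PvPath h role vis n → ∀ {u y w}, vis = u ++ y :: w → PvPath h role (u ++ [y]) y := by
  intro vis n hp
  induction hp with
  | start =>
    intro u y w hv
    cases u with
    | nil =>
      simp at hv
      rw [hv.1.symm]
      exact PvPath.start
    | cons a u' => simp at hv
  | step hp hc ih =>
    rename_i vis' n' c'
    intro u y w hv
    rcases List.eq_nil_or_concat w with hw | ⟨w'', c'', hw⟩
    · subst hw
      have hlen : vis'.length = u.length := by
        have := congrArg List.length hv; simp at this; omega
      have := List.append_inj hv.symm hlen.symm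
      rcases this with ⟨hu, hy⟩
      simp at hy
      subst hy
      subst hu
      exact PvPath.step hp hc
    · subst hw
      have heq : vis' ++ [c'] = (u ++ y :: w'') ++ [c''] := by
        simpa [List.concat_eq_append] using hv
      have h2 := List.append_inj heq
        (by have := congrArg List.length heq; simp at this ⊢; omega)
      rcases h2 with ⟨hvis, -⟩
      exact ih hvis

theorem pv_path_split (h : List (String × List String)) (role : String) :
    ∀ {vis n}, PvPath h role vis n → ∀ {u x w}, vis = u ++ x :: w →
      (w = [] ∧ n = x) ∨ n ∈ pvReach h (w.length - 1) (pvChs h x) := by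
  intro vis n hp
  induction hp with
  | start =>
    intro u x w hv
    cases u with
    | nil => simp at hv; exact Or.inl ⟨hv.2, hv.1⟩
    | cons a u' => simp at hv
  | step hp hc ih =>
    rename_i vis' n' c'
    intro u x w hv
    rcases List.eq_nil_or_concat w with hw | ⟨w'', c'', hw⟩
    · subst hw
      have hlen : vis'.length = u.length := by
        have := congrArg List.length hv; simp at this; omega
      have := List.append_inj hv.symm hlen.symm
      simp at this
      exact Or.inl ⟨rfl, this.2.symm⟩
    · subst hw
      have heq : vis' ++ [c'] = (u ++ x :: w'') ++ [c''] := by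
        simpa [List.concat_eq_append] using hv
      have h2 := List.append_inj heq
        (by have := congrArg List.length heq; simp at this ⊢; omega)
      rcases h2 with ⟨hvis, hcc⟩
      simp at hcc
      subst hcc
      right
      rw [List.concat_eq_append]
      rcases List.eq_nil_or_concat w'' with hw2 | hw2ex
      · subst hw2
        have hlast := pv_path_last h role hp
        rw [hvis] at hlast
        simp at hlast
        subst hlast
        simpa [pvReach] using hc
      · have hne : w'' ≠ [] := by rcases hw2ex with ⟨a, b, hx⟩; subst hx; simp
        rcases ih hvis with ⟨hw0, -⟩ | hr
        · exact absurd hw0 hne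
        · have hl : (w'' ++ [c']).length - 1 = (w''.length - 1) + 1 := by
            have := List.length_pos_iff.mpr hne; simp; omega
          rw [hl, pv_reach_succ']
          exact pv_step_mem h hr hc

-- appending a fresh element keeps a list repetition-free
theorem pv_nodup_snoc {vis : List String} {c : String} (hnd : vis.Nodup) (hnotin : c ∉ vis) :
    (vis ++ [c]).Nodup := by
  simp [List.nodup_append, hnd]
  intro a ha hac
  subst hac
  exact hnotin ha

-- pigeonhole: a repetition-free path visits at most pvN roles
theorem pv_path_len (h : List (String × List String)) (role : String)
    {vis : List String} {n : String} (hp : PvPath h role vis n) (hnd : vis.Nodup) :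
    vis.length ≤ pvN h := by
  rcases pv_path_shape h role hp with ⟨rest, hv, hsub⟩
  subst hv
  have hnd' : rest.Nodup := (List.nodup_cons.mp hnd).2
  have hsub' : rest ⊆ (pvVals h).dedup := fun y hy => List.mem_dedup.mpr (hsub hy)
  have := (hnd'.subperm hsub').length_le
  simp [pvN]
  omega

-- no-revisit: under Pre_, a child of the endpoint of a repetition-free path is fresh
theorem pv_no_revisit (h : List (String × List String)) (role : String)
    (hpre : Pre_get_subordinate_roles role h) :
    ∀ {vis n c}, PvPath h role vis n → vis.Nodup → c ∈ pvChs h n → c ∉ vis := by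
  intro vis n c hp hnd hc hmem
  rcases List.append_of_mem hmem with ⟨u, w, hsplit⟩
  have hlen_vis := pv_path_len h role hp hnd
  -- c is reachable from role_name within pvN steps
  have hpref := pv_path_prefix h role hp hsplit
  have hend := pv_path_end_reach h role hpref
  have hwlen : u.length + w.length + 1 = vis.length := by
    have := congrArg List.length hsplit; simp at this; omega
  have hu_le : (u ++ [c]).length - 1 ≤ pvN h := by simp; omega
  have hcR : c ∈ pvReach h (pvN h) [role] := pv_reach_mono_fuel h hu_le _ hend
  -- and c is reachable from its own children within pvN steps (a cycle)
  have hcC : c ∈ pvReach h (pvN h) (pvChs h c) := by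
    rcases pv_path_split h role hp hsplit with ⟨hw, hn⟩ | hr
    · subst hn
      exact pv_sub_reach h _ _ hc
    · have hstep : c ∈ pvReach h ((w.length - 1) + 1) (pvChs h c) := by
        rw [pv_reach_succ']
        exact pv_step_mem h hr hc
      exact pv_reach_mono_fuel h (by omega) _ hstep
  exact hpre c hcR hcC

-- depth-stability of the traversal along repetition-free paths
theorem pv_stab (h : List (String × List String)) (role : String)
    (hpre : Pre_get_subordinate_roles role h) :
    ∀ k f g vis n, f + g ≤ k → PvPath h role vis n → vis.Nodup →
      pvN h ≤ f + vis.length → pvN h ≤ g + vis.length → pvT h f n = pvT h g n := by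
  intro k
  induction k with
  | zero =>
    intro f g vis n hfg _ _ _ _
    have hf0 : f = 0 := by omega
    have hg0 : g = 0 := by omega
    subst hf0; subst hg0; rfl
  | succ k ih =>
    intro f g vis n hfg hp hnd hf hg
    have hchs : f = 0 ∨ g = 0 → pvChs h n = [] := by
      intro h0
      by_contra hne
      obtain ⟨c, hc⟩ := List.exists_mem_of_ne_nil _ hne
      have hnotin := pv_no_revisit h role hpre hp hnd hc
      have hp' := PvPath.step hp hc
      have hnd' : (vis ++ [c]).Nodup := pv_nodup_snoc hnd hnotin
      have := pv_path_len h role hp' hnd'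
      simp at this
      omega
    cases f with
    | zero =>
      cases g with
      | zero => rfl
      | succ g' => simp [pvT, hchs (Or.inl rfl)]
    | succ f' =>
      cases g with
      | zero => simp [pvT, hchs (Or.inr rfl)]
      | succ g' =>
        show (pvChs h n).flatMap (fun c => c :: pvT h f' c)
            = (pvChs h n).flatMap (fun c => c :: pvT h g' c)
        simp only [List.flatMap]
        congr 1
        apply List.map_congr_left
        intro c hc
        have hnotin := pv_no_revisit h role hpre hp hnd hc
        have hp' := PvPath.step hp hc
        have hnd' : (vis ++ [c]).Nodup := pv_nodup_snoc hnd hnotin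
        have := ih f' g' (vis ++ [c]) c (by omega) hp' hnd'
          (by simp; omega) (by simp; omega)
        simp [this]

-- under Pre_, the traversal at full depth pvN unfolds one level without losing depth
theorem pv_unfoldT (h : List (String × List String)) (role : String)
    (hpre : Pre_get_subordinate_roles role h) {vis : List String} {n : String}
    (hp : PvPath h role vis n) (hnd : vis.Nodup) :
    pvT h (pvN h) n = (pvChs h n).flatMap (fun c => c :: pvT h (pvN h) c) := by
  have hm : pvN h = (pvVals h).dedup.length + 1 := rfl
  rw [hm]
  show (pvChs h n).flatMap (fun c => c :: pvT h (pvVals h).dedup.length c) = _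
  simp only [List.flatMap]
  congr 1
  apply List.map_congr_left
  intro c hc
  have hnotin := pv_no_revisit h role hpre hp hnd hc
  have hp' := PvPath.step hp hc
  have hnd' : (vis ++ [c]).Nodup := pv_nodup_snoc hnd hnotin
  have hv1 : 1 ≤ vis.length := by
    rcases pv_path_shape h role hp with ⟨rest, hv, -⟩
    subst hv; simp
  have hstab := pv_stab h role hpre
    ((pvVals h).dedup.length + ((pvVals h).dedup.length + 1))
    (pvVals h).dedup.length ((pvVals h).dedup.length + 1) (vis ++ [c]) c
    (by omega) hp' hnd'
    (by simp only [pvN, List.length_append, List.length_cons]; omega)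
    (by simp only [pvN, List.length_append, List.length_cons]; omega)
  rw [hstab]

-- A-side: the recursion with accumulator computes acc ++ the pure traversal
theorem pv_arec_eq (h : List (String × List String)) :
    ∀ f acc n, pvARec h f acc n = acc ++ pvT h f n := by
  intro f
  induction f with
  | zero => intro acc n; simp [pvARec, pvT]
  | succ f ih =>
    intro acc n
    show (pvChs h n).foldl _ acc = _
    have key : ∀ (l : List String) (acc : List String),
        l.foldl (fun a c => pvARec h f (a ++ [c]) c) acc
          = acc ++ l.flatMap (fun c => c :: pvT h f c) := by
      intro l
      induction l with
      | nil => simp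
      | cons c l ihl => intro acc; simp [List.foldl_cons, ih, List.flatMap]
    rw [key]
    rfl

-- length bound on the traversal
theorem pv_lenT (h : List (String × List String)) :
    ∀ f n, (pvT h f n).length < ((pvVals h).length + 1) ^ (f + 1) := by
  intro f
  induction f with
  | zero => intro n; simp [pvT]
  | succ f ih =>
    intro n
    have hlen : (pvT h (f + 1) n).length
        = ((pvChs h n).map (fun c => (c :: pvT h f c).length)).sum := by
      simp [pvT, List.length_flatMap]
    rw [hlen]
    have hbound : ∀ x ∈ (pvChs h n).map (fun c => (c :: pvT h f c).length),
        x ≤ ((pvVals h).length + 1) ^ (f + 1) := by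
      intro x hx
      simp at hx
      rcases hx with ⟨c, -, hx⟩
      have := ih c
      simp at hx ⊢
      omega
    have hsum := List.sum_le_card_nsmul _ _ hbound
    simp at hsum
    have hc := pv_chs_len_le h n
    calc ((pvChs h n).map (fun c => (c :: pvT h f c).length)).sum
        ≤ (pvChs h n).length * ((pvVals h).length + 1) ^ (f + 1) := by simpa using hsum
      _ ≤ (pvVals h).length * ((pvVals h).length + 1) ^ (f + 1) :=
          Nat.mul_le_mul_right _ hc
      _ < ((pvVals h).length + 1) ^ (f + 2) := by
          have hpow : ((pvVals h).length + 1) ^ (f + 2)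
              = ((pvVals h).length + 1) * ((pvVals h).length + 1) ^ (f + 1) := by ring
          rw [hpow]
          have hp : 0 < ((pvVals h).length + 1) ^ (f + 1) := by positivity
          nlinarith

-- the initial worklist's flattened traversals fit inside the fuel
theorem pv_flat_len (h : List (String × List String)) (x : String) :
    ((pvChs h x).flatMap (fun c => c :: pvT h (pvN h) c)).length ≤ pvFuel h := by
  have hlen : ((pvChs h x).flatMap (fun c => c :: pvT h (pvN h) c)).length
      = ((pvChs h x).map (fun c => (c :: pvT h (pvN h) c).length)).sum := by
    simp [List.length_flatMap]
  rw [hlen]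
  have hbound : ∀ y ∈ (pvChs h x).map (fun c => (c :: pvT h (pvN h) c).length),
      y ≤ ((pvVals h).length + 1) ^ (pvN h + 1) := by
    intro y hy
    simp at hy
    rcases hy with ⟨c, -, hy⟩
    have := pv_lenT h (pvN h) c
    omega
  have hsum := List.sum_le_card_nsmul _ _ hbound
  simp at hsum
  have hc := pv_chs_len_le h x
  calc ((pvChs h x).map (fun c => (c :: pvT h (pvN h) c).length)).sum
      ≤ (pvChs h x).length * ((pvVals h).length + 1) ^ (pvN h + 1) := by simpa using hsum
    _ ≤ (pvVals h).length * ((pvVals h).length + 1) ^ (pvN h + 1) :=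
        Nat.mul_le_mul_right _ hc
    _ ≤ pvFuel h := by
        have hpow : pvFuel h
            = ((pvVals h).length + 1) * ((pvVals h).length + 1) ^ (pvN h + 1) := by
          simp [pvFuel]; ring
        rw [hpow]
        exact Nat.mul_le_mul_right _ (by omega)

-- B-side: the worklist loop computes res ++ the flattened traversals, given enough fuel
theorem pv_bloop_eq (h : List (String × List String)) (role : String)
    (hpre : Pre_get_subordinate_roles role h) :
    ∀ fuel stack res,
      (∀ x ∈ stack, ∃ vis, PvPath h role vis x ∧ vis.Nodup) →
      (stack.flatMap (fun c => c :: pvT h (pvN h) c)).length ≤ fuel →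
      pvBLoop h fuel stack res = res ++ stack.flatMap (fun c => c :: pvT h (pvN h) c) := by
  intro fuel
  induction fuel with
  | zero =>
    intro stack res hgood hlen
    cases stack with
    | nil => simp [pvBLoop]
    | cons n rest => simp at hlen
  | succ fuel ih =>
    intro stack res hgood hlen
    cases stack with
    | nil => simp [pvBLoop]
    | cons n rest =>
      obtain ⟨vis, hp, hnd⟩ := hgood n (by simp)
      have hkey := pv_unfoldT h role hpre hp hnd
      have hgood' : ∀ x ∈ pvChs h n ++ rest, ∃ vis, PvPath h role vis x ∧ vis.Nodup := by
        intro x hx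
        rcases List.mem_append.mp hx with hx | hx
        · have hnotin := pv_no_revisit h role hpre hp hnd hx
          exact ⟨vis ++ [x], PvPath.step hp hx, pv_nodup_snoc hnd hnotin⟩
        · exact hgood x (by simp [hx])
      have hflat : (pvChs h n ++ rest).flatMap (fun c => c :: pvT h (pvN h) c)
          = pvT h (pvN h) n ++ rest.flatMap (fun c => c :: pvT h (pvN h) c) := by
        rw [List.flatMap_append, hkey]
      have hlen' : ((pvChs h n ++ rest).flatMap (fun c => c :: pvT h (pvN h) c)).length ≤ fuel := by
        rw [hflat]
        simp at hlen ⊢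
        omega
      show pvBLoop h fuel (pvChs h n ++ rest) (res ++ [n]) = _
      rw [ih _ _ hgood' hlen', hflat]
      simp

-- ===== VERDICT (by name: the statement is the Claim_ definition above) =====
theorem get_subordinate_roles_spec : Claim_equal_get_subordinate_roles := by
  unfold Claim_equal_get_subordinate_roles
  intro role h _ hpre
  unfold Spec_get_subordinate_roles get_subordinate_roles get_subordinate_roles_alt
  rw [pv_arec_eq]
  have hgood : ∀ x ∈ pvChs h role, ∃ vis, PvPath h role vis x ∧ vis.Nodup := by
    intro x hx
    have hnotin := pv_no_revisit h role hpre PvPath.start (by simp) hx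
    exact ⟨[role] ++ [x], PvPath.step PvPath.start hx,
      pv_nodup_snoc (by simp) hnotin⟩
  rw [pv_bloop_eq h role hpre _ _ _ hgood (pv_flat_len h role)]
  rw [← pv_unfoldT h role hpre PvPath.start (by simp)]
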